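-- pv_equiv track=rewrite | github.com/nico-urrutia/Matrix-Calculator | matrix_f.py | augment_matrix
-- ===== SOURCE A (Python) =====
-- def identity_matrix(matrix):
--     identity:  list = []
--     for i in range(len(matrix)):
--         row = []
--         for j in range(len(matrix)):
--             row.append(0)
--         identity.append(row)
--     for k in range(len(matrix)):
--         identity[k][k]+=1
--     return identity
--
-- def augment_matrix(matrix):
--     identity = identity_matrix(matrix)
--     augmented = []
--     for i in range(len(matrix)):
--         row = []
--         for number in matrix[i]:
--             row.append(number)
--         for number in identity[i]:
--             row.append(number)
--         augmented.append(row)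
--     return augmented
-- ===== SOURCE B (Python) =====
-- def augment_matrix(matrix):
--     # Maintain the current identity row as a unit vector that is shifted
--     # right by one position after each row; no identity matrix is ever built.
--     e = [1] + [0] * (len(matrix) - 1)
--     augmented = []
--     for row in matrix:
--         augmented.append(row + e)
--         e = [0] + e[:-1]
--     return augmented
-- ===== Notes on version B (the rewrite author's own statement) =====
-- stated objective: alternative
-- what changed: Replaces the separately built identity matrix (three index loops plus in-place diagonal increments) by a single pass over the rows that maintains one unit vector as running state, shifting it right by one position after each row.
import Mathlib
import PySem

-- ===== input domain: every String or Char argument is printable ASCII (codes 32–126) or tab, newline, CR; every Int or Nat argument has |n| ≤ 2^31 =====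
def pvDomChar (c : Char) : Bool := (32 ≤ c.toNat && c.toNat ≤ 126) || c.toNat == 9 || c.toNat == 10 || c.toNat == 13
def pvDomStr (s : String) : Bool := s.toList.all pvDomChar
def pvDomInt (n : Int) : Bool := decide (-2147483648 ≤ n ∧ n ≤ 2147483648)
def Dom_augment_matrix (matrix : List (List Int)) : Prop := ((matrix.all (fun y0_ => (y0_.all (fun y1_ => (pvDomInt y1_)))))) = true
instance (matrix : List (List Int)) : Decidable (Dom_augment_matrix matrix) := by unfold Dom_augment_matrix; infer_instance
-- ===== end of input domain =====

-- B replaces A's separately built identity matrix by a single pass over the rows that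
-- maintains one unit vector as running state, shifted right after each row (objective: alternative).

-- ===== PORT A =====
-- identity_matrix: zero matrix built by nested append loops, then identity[k][k] += 1 in place.
def identity_matrix (matrix : List (List Int)) : List (List Int) :=
  let identity : List (List Int) :=
    (List.range matrix.length).foldl
      (fun identity _ =>
        identity ++ [(List.range matrix.length).foldl (fun row _ => row ++ [(0 : Int)]) []])
      []
  (List.range matrix.length).foldl
    (fun identity k => identity.modify k (fun row => row.modify k (fun x => x + 1)))
    identity

def augment_matrix (matrix : List (List Int)) : List (List Int) :=
  let identity := identity_matrix matrix
  (List.range matrix.length).foldl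
    (fun augmented i =>
      let row := (matrix.getD i []).foldl (fun row number => row ++ [number]) []
      let row := (identity.getD i []).foldl (fun row number => row ++ [number]) row
      augmented ++ [row])
    []

-- ===== PORT B =====
-- e[:-1] on a list is exactly List.dropLast; [0] + e[:-1] is (0 :: e.dropLast).
def augment_matrix_alt (matrix : List (List Int)) : List (List Int) :=
  let e0 : List Int := 1 :: List.replicate (matrix.length - 1) 0
  (matrix.foldl
    (fun st row => (st.1 ++ [row ++ st.2], (0 : Int) :: st.2.dropLast))
    (([] : List (List Int)), e0)).1

-- ===== PRECONDITION & SPEC =====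
def Spec_augment_matrix (matrix : List (List Int)) (out : List (List Int)) : Prop := out = augment_matrix_alt matrix
instance (matrix : List (List Int)) (out : List (List Int)) : Decidable (Spec_augment_matrix matrix out) := by unfold Spec_augment_matrix; infer_instance

-- ===== CLAIM (what is proved, stated in full; the proofs are below) =====
def Claim_equal_augment_matrix : Prop := ∀ (matrix : List (List Int)), Dom_augment_matrix matrix → Spec_augment_matrix matrix (augment_matrix matrix)

-- ===== LEMMAS AND PROOFS =====

-- B's shift step, named for the proofs
def shiftI (e : List Int) : List Int := 0 :: e.dropLast

-- the zero-row loop builds a replicate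
theorem foldl_zero_row (m : Nat) (acc : List Int) :
    (List.range m).foldl (fun row _ => row ++ [(0 : Int)]) acc = acc ++ List.replicate m 0 := by
  induction m generalizing acc with
  | zero => simp
  | succ m ih =>
      rw [List.range_succ, List.foldl_append, ih]
      simp [List.replicate_succ']

-- modify at the head of the suffix
theorem modify_append (pre : List (List Int)) (x : List Int) (rest : List (List Int))
    (f : List Int → List Int) :
    (pre ++ x :: rest).modify pre.length f = pre ++ f x :: rest := by
  induction pre with
  | nil => simp [List.modify]
  | cons a pre ih =>
      simpa [List.modify] using congrArg (fun l => a :: l) ih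

-- the diagonal-increment loop over a map of range'
theorem foldl_diag (m : Nat) :
    ∀ (s : Nat) (pre : List (List Int)) (g : Nat → List Int), pre.length = s →
    (List.range' s m).foldl (fun id k => id.modify k (fun row => row.modify k (fun x => x + 1)))
        (pre ++ (List.range' s m).map g)
      = pre ++ (List.range' s m).map (fun k => (g k).modify k (fun x => x + 1)) := by
  induction m with
  | zero => intro s pre g h; simp
  | succ m ih =>
      intro s pre g h
      subst h
      rw [List.range'_succ]
      simp only [List.map_cons, List.foldl_cons]
      rw [modify_append]
      have := ih (pre.length + 1) (pre ++ [(g pre.length).modify pre.length (fun x => x + 1)]) g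
        (by simp)
      simpa using this

theorem identity_matrix_eq (matrix : List (List Int)) :
    identity_matrix matrix
      = (List.range matrix.length).map
          (fun k => (List.replicate matrix.length (0 : Int)).modify k (fun x => x + 1)) := by
  unfold identity_matrix
  have hz : (List.range matrix.length).foldl
      (fun identity _ =>
        identity ++ [(List.range matrix.length).foldl (fun row _ => row ++ [(0 : Int)]) []]) []
      = (List.range matrix.length).map (fun _ => List.replicate matrix.length (0 : Int)) := by
    rw [show (fun (identity : List (List Int)) (_ : Nat) =>
        identity ++ [(List.range matrix.length).foldl (fun row _ => row ++ [(0 : Int)]) []])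
      = fun identity _ => identity ++ [List.replicate matrix.length (0 : Int)] by
        funext id k; rw [foldl_zero_row]; simp]
    simpa using PySem.List.foldl_append_singleton_eq_map
      (l := List.range matrix.length) (f := fun _ => List.replicate matrix.length (0 : Int)) (acc := [])
  simp only [hz]
  have := foldl_diag matrix.length 0 [] (fun _ => List.replicate matrix.length (0 : Int)) rfl
  simp [List.range_eq_range'] at this ⊢
  exact this

-- A's canonical form: row i is matrix[i] followed by the i-th row of the identity
theorem augment_matrix_eq (matrix : List (List Int)) :
    augment_matrix matrix
      = (List.range matrix.length).map (fun i =>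
          matrix.getD i [] ++ (List.replicate matrix.length (0 : Int)).modify i (fun x => x + 1)) := by
  unfold augment_matrix
  simp only []
  rw [identity_matrix_eq]
  rw [show (fun (augmented : List (List Int)) (i : Nat) =>
      augmented ++ [((List.range matrix.length).map
          (fun k => (List.replicate matrix.length (0 : Int)).modify k (fun x => x + 1))).getD i [] |>.foldl
        (fun row number => row ++ [number])
        ((matrix.getD i []).foldl (fun row number => row ++ [number]) [])])
    = fun augmented i => augmented ++ [matrix.getD i [] ++
        (((List.range matrix.length).map
          (fun k => (List.replicate matrix.length (0 : Int)).modify k (fun x => x + 1))).getD i [])] by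
      funext aug i
      rw [PySem.List.foldl_append_singleton_eq_self, PySem.List.foldl_append_singleton_eq_self]
      simp]
  rw [PySem.List.foldl_append_singleton_eq_map]
  simp only [List.nil_append]
  apply List.map_congr_left
  intro i hi
  rw [List.mem_range] at hi
  simp [List.getD_eq_getElem?_getD, List.getElem?_map, List.getElem?_range hi]

-- B's fold unrolled: row i is rows[i] followed by the unit vector shifted i times
theorem foldl_B (rows : List (List Int)) (acc : List (List Int)) (e : List Int) :
    (rows.foldl (fun st row => (st.1 ++ [row ++ st.2], (0 : Int) :: st.2.dropLast)) (acc, e)).1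
      = acc ++ (List.range rows.length).map (fun i => rows.getD i [] ++ shiftI^[i] e) := by
  induction rows generalizing acc e with
  | nil => simp
  | cons a rows ih =>
      simp only [List.foldl_cons, List.length_cons]
      rw [ih]
      rw [List.range_succ_eq_map]
      simp only [List.map_cons, List.map_map, List.getD_cons_zero, Function.iterate_zero,
        id_eq, List.append_assoc, List.singleton_append]
      rfl

-- shifting preserves length (nonempty lists) and pushes entries right
theorem shiftI_iter_length (k : Nat) (e : List Int) (he : e ≠ []) :
    (shiftI^[k] e).length = e.length := by
  induction k generalizing e with
  | zero => rfl
  | succ k ih =>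
      rw [Function.iterate_succ_apply]
      rw [ih (shiftI e) (by simp [shiftI])]
      simp [shiftI, List.length_dropLast]
      cases e with
      | nil => exact absurd rfl he
      | cons x xs => simp
theorem shiftI_iter_getElem (k : Nat) (e : List Int) (he : e ≠ []) (j : Nat)
    (hj : j < (shiftI^[k] e).length) :
    (shiftI^[k] e)[j] = if j < k then 0 else e.getD (j - k) 0 := by
  induction k generalizing e with
  | zero =>
      simp only [Function.iterate_zero, id_eq] at hj ⊢
      simp [List.getD_eq_getElem?_getD, List.getElem?_eq_getElem hj]
  | succ k ih =>
      simp only [Function.iterate_succ_apply] at hj ⊢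
      rw [ih (shiftI e) (by simp [shiftI]) hj]
      have hje : j < e.length := by
        rw [shiftI_iter_length k (shiftI e) (by simp [shiftI])] at hj
        simp [shiftI, List.length_dropLast] at hj
        cases e with
        | nil => exact absurd rfl he
        | cons x xs => simpa using hj
      by_cases h1 : j < k
      · simp [h1, Nat.lt_succ_of_lt h1]
      · by_cases h2 : j = k
        · subst h2; simp [shiftI]
        · have hk : k < j := by omega
          simp only [if_neg h1, if_neg (by omega : ¬ j < k + 1)]
          have hjk : j - k = (j - (k+1)) + 1 := by omega
          rw [hjk]
          cases e with
          | nil => exact absurd rfl he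
          | cons x xs =>
              simp only [shiftI]
              rw [List.getD_cons_succ]
              have hlt : j - (k+1) < xs.length := by simpa using (by omega : j - (k+1) < (x :: xs).length - 1)
              rw [List.getD_eq_getElem?_getD, List.getD_eq_getElem?_getD]
              rw [List.getElem?_eq_getElem
                    (show j - (k+1) < ((x :: xs).dropLast).length by simp; omega),
                  List.getElem?_eq_getElem
                    (show j - (k+1) < (x :: xs).length by simp; omega)]
              simp [List.getElem_dropLast]

-- the shifted unit vector is the i-th identity row
theorem shiftI_unit (n i : Nat) (hi : i < n) :
    shiftI^[i] (1 :: List.replicate (n - 1) (0 : Int))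
      = (List.replicate n (0 : Int)).modify i (fun x => x + 1) := by
  have he : (1 :: List.replicate (n - 1) (0 : Int)) ≠ [] := by simp
  have hlen : (1 :: List.replicate (n - 1) (0 : Int)).length = n := by
    simp; omega
  apply List.ext_getElem
  · rw [shiftI_iter_length i _ he, hlen]; simp
  · intro j h1 h2
    rw [shiftI_iter_getElem i _ he j h1]
    simp only [List.getElem_modify, List.getElem_replicate]
    have hn : j < n := by simpa using h2
    by_cases hji : i = j
    · subst hji; simp
    · rw [if_neg hji]
      have hne : i ≠ j := hji
      by_cases hlt : j < i
      · simp [hlt]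
      · rw [if_neg hlt]
        rw [show j - i = (j - i - 1) + 1 by omega]
        rw [List.getD_cons_succ]
        have hlt2 : j - i - 1 < n - 1 := by omega
        simp [List.getD_eq_getElem?_getD,
          List.getElem?_eq_getElem
            (show j - i - 1 < (List.replicate (n - 1) (0 : Int)).length by simpa using hlt2)]

-- ===== VERDICT (by name: the statement is the Claim_ definition above) =====
theorem augment_matrix_spec : Claim_equal_augment_matrix := by
  intro matrix _
  unfold Spec_augment_matrix augment_matrix_alt
  simp only []
  rw [foldl_B, augment_matrix_eq]
  simp only [List.nil_append]
  apply List.map_congr_left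
  intro i hi
  rw [List.mem_range] at hi
  rw [shiftI_unit matrix.length i hi]
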